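-- pv_equiv track=rewrite | github.com/suryavignesh1304/DSA | recurssion/sortedarr.py | exp_f
-- ===== SOURCE A (Python) =====
-- def exp_f(base_value, exp):
--     if exp == 0:
--         return 1
--     if exp == 1:
--         return base_value
--
--     if exp % 2 == 0:
--         h = exp_f(base_value, exp // 2)
--         return h * h
--     else:
--         h = exp_f(base_value, exp // 2)
--         return base_value *h*h
-- ===== SOURCE B (Python) =====
-- def exp_f(base_value, exp):
--     result = 1
--     cur = base_value
--     while exp > 0:
--         if exp % 2 == 1:
--             result *= cur
--         cur *= cur
--         exp //= 2
--     return result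
-- ===== Notes on version B (the rewrite author's own statement) =====
-- stated objective: alternative
-- what changed: Replaced the recursive halving (square after the recursive call) with an iterative bottom-up exponentiation-by-squaring loop keeping an accumulator and a running square.
import Mathlib
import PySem

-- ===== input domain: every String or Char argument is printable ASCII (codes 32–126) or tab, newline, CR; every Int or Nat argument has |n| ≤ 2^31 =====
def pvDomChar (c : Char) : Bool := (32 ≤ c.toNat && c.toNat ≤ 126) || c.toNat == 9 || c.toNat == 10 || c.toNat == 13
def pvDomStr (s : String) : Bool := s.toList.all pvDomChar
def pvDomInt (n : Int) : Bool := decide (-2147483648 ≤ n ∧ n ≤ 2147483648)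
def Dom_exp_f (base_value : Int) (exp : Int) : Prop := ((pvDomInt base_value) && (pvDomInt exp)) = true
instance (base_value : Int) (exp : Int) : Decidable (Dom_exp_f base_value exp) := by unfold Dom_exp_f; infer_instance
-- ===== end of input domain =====

-- B replaces A's top-down recursive squaring with an iterative exponentiation-by-squaring loop (alternative decomposition, same multiplication count); return-value equivalence on exp ≥ 0.

-- ===== PORT A =====
-- Python A recurses with exp // 2; for exp < 0 that recursion never terminates
-- (RecursionError), so that branch is unreachable under Pre_ and the port returns 0 there.
def exp_f (base_value : Int) (exp : Int) : Int :=
  if exp = 0 then 1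
  else if exp = 1 then base_value
  else if h : 2 ≤ exp then
    if PySem.Int.mod exp 2 = 0 then
      let hh := exp_f base_value (PySem.Int.floordiv exp 2)
      hh * hh
    else
      let hh := exp_f base_value (PySem.Int.floordiv exp 2)
      base_value * hh * hh
  else 0
termination_by exp.toNat
decreasing_by
  all_goals
    rw [PySem.Int.floordiv_eq_ediv_of_pos (by omega : (0:Int) < 2)]
    omega

-- ===== PORT B =====
def exp_f_altGo (result cur e : Int) : Int :=
  if 0 < e then
    exp_f_altGo (if PySem.Int.mod e 2 = 1 then result * cur else result)
      (cur * cur) (PySem.Int.floordiv e 2)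
  else result
termination_by e.toNat
decreasing_by
  rw [PySem.Int.floordiv_eq_ediv_of_pos (by omega : (0:Int) < 2)]
  omega

def exp_f_alt (base_value : Int) (exp : Int) : Int :=
  exp_f_altGo 1 base_value exp

-- ===== PRECONDITION & SPEC =====
-- Pre_ excludes exp < 0, on which Python A recurses forever (RecursionError).
def Pre_exp_f (base_value : Int) (exp : Int) : Prop := 0 ≤ exp
instance (base_value : Int) (exp : Int) : Decidable (Pre_exp_f base_value exp) := by unfold Pre_exp_f; infer_instance
def pvWitness_exp_f : Int × Int := (3, 7)

def Spec_exp_f (base_value : Int) (exp : Int) (out : Int) : Prop := out = exp_f_alt base_value exp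
instance (base_value : Int) (exp : Int) (out : Int) : Decidable (Spec_exp_f base_value exp out) := by unfold Spec_exp_f; infer_instance

-- ===== CLAIM (what is proved, stated in full; the proofs are below) =====
def Claim_equal_exp_f : Prop := ∀ (base_value : Int) (exp : Int), Dom_exp_f base_value exp → Pre_exp_f base_value exp → Spec_exp_f base_value exp (exp_f base_value exp)

-- ===== LEMMAS AND PROOFS =====

-- A computes b ^ e for 0 ≤ e
theorem exp_f_eq_pow (b : Int) (e : Int) (he : 0 ≤ e) : exp_f b e = b ^ e.toNat := by
  obtain ⟨n, rfl⟩ : ∃ n : Nat, e = (n : Int) := ⟨e.toNat, (Int.toNat_of_nonneg he).symm⟩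
  clear he
  induction n using Nat.strong_induction_on with
  | _ n ih =>
    rw [exp_f]
    by_cases h0 : (n : Int) = 0
    · simp [h0]
    · rw [if_neg h0]
      by_cases h1 : (n : Int) = 1
      · have : n = 1 := by omega
        simp [this]
      · rw [if_neg h1]
        have h2 : (2 : Int) ≤ (n : Int) := by omega
        rw [dif_pos h2]
        rw [PySem.Int.mod_eq_emod_of_pos (by omega : (0:Int) < 2),
            PySem.Int.floordiv_eq_ediv_of_pos (by omega : (0:Int) < 2)]
        have hdiv : (n : Int) / 2 = ((n / 2 : Nat) : Int) := by omega
        have hlt : n / 2 < n := by omega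
        rw [hdiv, ih (n / 2) hlt]
        simp only [Int.toNat_natCast]
        by_cases hpar : (n : Int) % 2 = 0
        · rw [if_pos hpar, ← pow_add]
          congr 1
          omega
        · rw [if_neg hpar, mul_assoc, ← pow_add, ← pow_succ']
          congr 1
          omega

-- B's loop invariant
theorem exp_f_altGo_eq (r c : Int) (e : Int) (he : 0 ≤ e) : exp_f_altGo r c e = r * c ^ e.toNat := by
  obtain ⟨n, rfl⟩ : ∃ n : Nat, e = (n : Int) := ⟨e.toNat, (Int.toNat_of_nonneg he).symm⟩
  clear he
  induction n using Nat.strong_induction_on generalizing r c with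
  | _ n ih =>
    rw [exp_f_altGo]
    by_cases h0 : (0 : Int) < (n : Int)
    · rw [if_pos h0]
      rw [PySem.Int.mod_eq_emod_of_pos (by omega : (0:Int) < 2),
          PySem.Int.floordiv_eq_ediv_of_pos (by omega : (0:Int) < 2)]
      have hdiv : (n : Int) / 2 = ((n / 2 : Nat) : Int) := by omega
      have hlt : n / 2 < n := by omega
      rw [hdiv, ih (n / 2) hlt]
      simp only [Int.toNat_natCast, mul_pow]
      by_cases hpar : (n : Int) % 2 = 1
      · rw [if_pos hpar]
        have hn : c ^ (n / 2) * c ^ (n / 2) * c = c ^ n := by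
          rw [← pow_add, ← pow_succ]
          congr 1
          omega
        rw [← hn]
        ring
      · rw [if_neg hpar]
        have hn : c ^ (n / 2) * c ^ (n / 2) = c ^ n := by
          rw [← pow_add]
          congr 1
          omega
        rw [← hn]
    · rw [if_neg h0]
      have : n = 0 := by omega
      simp [this]

-- ===== VERDICT (by name: the statement is the Claim_ definition above) =====
theorem exp_f_spec : Claim_equal_exp_f := by
  intro b e _ hpre
  unfold Spec_exp_f exp_f_alt
  rw [exp_f_eq_pow b e hpre, exp_f_altGo_eq 1 b e hpre, one_mul]
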